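-- pv_equiv track=rewrite | github.com/UtopAIBuilder/SemanticParser | Cparser/src/label.py | deterministic_side_effects
-- ===== SOURCE A (Python) =====
-- MEMORY_SIGNALS = {
--     "malloc", "free", "realloc", "calloc",
--     "heap_caps_malloc", "heap_caps_free", "heap_caps_calloc", "heap_caps_realloc",
--     "pvPortMalloc", "vPortFree",
-- }
--
-- IO_SIGNALS = {
--     "printf", "fprintf", "fwrite", "fread", "write", "read",
--     "fopen", "fclose", "puts", "fputs",
--     "ESP_LOGI", "ESP_LOGE", "ESP_LOGW", "ESP_LOGD", "ESP_LOGV",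
--     "esp_log_write", "uart_write_bytes", "uart_read_bytes",
-- }
--
-- HW_SIGNALS_EXACT = {
--     "gpio_set_level", "gpio_get_level", "gpio_config",
--     "gpio_set_direction", "gpio_set_pull_mode",
--     "uart_param_config", "uart_driver_install", "uart_driver_delete",
--     "spi_bus_initialize", "spi_bus_free", "spi_device_transmit",
--     "i2c_master_cmd_begin", "i2c_master_start", "i2c_master_stop",
--     "REG_WRITE", "REG_READ", "WRITE_PERI_REG", "READ_PERI_REG",
--     "SET_PERI_REG_MASK", "CLEAR_PERI_REG_MASK",
--     "esp_rom_gpio_pad_select_gpio",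
--     "ledc_set_duty", "ledc_update_duty",
--     "adc1_get_raw", "adc2_get_raw",
--     "rmt_write_items", "rmt_rx_start", "rmt_tx_start",
--     "timer_set_counter_value", "timer_start", "timer_pause",
--     "esp_intr_alloc", "esp_intr_free", "esp_intr_enable", "esp_intr_disable",
-- }
--
-- HW_PREFIXES = {
--     "HAL_", "gpio_", "uart_", "spi_", "i2c_", "ledc_", "adc_",
--     "rmt_", "timer_", "esp_rom_gpio",
-- }
--
-- def deterministic_side_effects(call_names: list[str]) -> tuple[list[str], bool]:
--     """
--     Match call_names against signal lists.
--
--     Returns: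
--         matched      - list of matched side_effect labels (may have multiple)
--         is_ambiguous - True when no signals matched but calls exist
--     """
--     matched: set[str] = set()
--
--     for name in call_names:
--         if name in MEMORY_SIGNALS:
--             matched.add("memory")
--         if name in IO_SIGNALS:
--             matched.add("io")
--         if name in HW_SIGNALS_EXACT:
--             matched.add("hardware")
--         for prefix in HW_PREFIXES:
--             if name.startswith(prefix):
--                 matched.add("hardware")
--                 break
--
--     is_ambiguous = (len(matched) == 0) and (len(call_names) > 0)
--     return sorted(matched), is_ambiguous
-- ===== SOURCE B (Python) =====
-- MEMORY_SIGNALS = {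
--     "malloc", "free", "realloc", "calloc",
--     "heap_caps_malloc", "heap_caps_free", "heap_caps_calloc", "heap_caps_realloc",
--     "pvPortMalloc", "vPortFree",
-- }
--
-- IO_SIGNALS = {
--     "printf", "fprintf", "fwrite", "fread", "write", "read",
--     "fopen", "fclose", "puts", "fputs",
--     "ESP_LOGI", "ESP_LOGE", "ESP_LOGW", "ESP_LOGD", "ESP_LOGV",
--     "esp_log_write", "uart_write_bytes", "uart_read_bytes",
-- }
--
-- HW_SIGNALS_EXACT = {
--     "gpio_set_level", "gpio_get_level", "gpio_config",
--     "gpio_set_direction", "gpio_set_pull_mode",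
--     "uart_param_config", "uart_driver_install", "uart_driver_delete",
--     "spi_bus_initialize", "spi_bus_free", "spi_device_transmit",
--     "i2c_master_cmd_begin", "i2c_master_start", "i2c_master_stop",
--     "REG_WRITE", "REG_READ", "WRITE_PERI_REG", "READ_PERI_REG",
--     "SET_PERI_REG_MASK", "CLEAR_PERI_REG_MASK",
--     "esp_rom_gpio_pad_select_gpio",
--     "ledc_set_duty", "ledc_update_duty",
--     "adc1_get_raw", "adc2_get_raw",
--     "rmt_write_items", "rmt_rx_start", "rmt_tx_start",
--     "timer_set_counter_value", "timer_start", "timer_pause",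
--     "esp_intr_alloc", "esp_intr_free", "esp_intr_enable", "esp_intr_disable",
-- }
--
-- HW_PREFIXES = {
--     "HAL_", "gpio_", "uart_", "spi_", "i2c_", "ledc_", "adc_",
--     "rmt_", "timer_", "esp_rom_gpio",
-- }
--
--
-- def deterministic_side_effects(call_names):
--     # Per-label scans; the label list is built directly in sorted order,
--     # so no set accumulation and no final sort are needed.
--     labels = [label for label, hit in (
--         ("hardware", any(n in HW_SIGNALS_EXACT
--                          or any(n.startswith(p) for p in HW_PREFIXES)
--                          for n in call_names)),
--         ("io", any(n in IO_SIGNALS for n in call_names)),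
--         ("memory", any(n in MEMORY_SIGNALS for n in call_names)),
--     ) if hit]
--     return labels, not labels and bool(call_names)
-- ===== Notes on version B (the rewrite author's own statement) =====
-- stated objective: simpler
-- what changed: A makes one pass per name accumulating a set of labels and sorts it at the end; B makes one scan per label (three any-scans) and emits the label list directly in sorted order, with no set and no sort.
import Mathlib
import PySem

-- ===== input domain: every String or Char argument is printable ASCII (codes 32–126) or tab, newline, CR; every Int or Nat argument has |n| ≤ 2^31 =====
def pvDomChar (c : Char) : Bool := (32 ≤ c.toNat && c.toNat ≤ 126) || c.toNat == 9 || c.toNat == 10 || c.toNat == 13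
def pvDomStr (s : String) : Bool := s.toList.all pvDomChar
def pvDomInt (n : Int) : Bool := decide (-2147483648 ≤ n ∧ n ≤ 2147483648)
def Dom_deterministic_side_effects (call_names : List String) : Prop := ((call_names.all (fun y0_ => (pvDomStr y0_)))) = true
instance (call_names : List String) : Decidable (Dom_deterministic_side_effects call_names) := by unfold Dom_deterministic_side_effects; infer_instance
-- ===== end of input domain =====

-- B replaces A's per-name pass over an accumulated, finally-sorted label set by one
-- any-scan per label, emitting the labels directly in sorted order (simpler; no set, no sort).

-- Shared module-level constants (Python set literals; no duplicates, so the literal lists are the sets)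
def MEMORY_SIGNALS : List String :=
  ["malloc", "free", "realloc", "calloc",
   "heap_caps_malloc", "heap_caps_free", "heap_caps_calloc", "heap_caps_realloc",
   "pvPortMalloc", "vPortFree"]

def IO_SIGNALS : List String :=
  ["printf", "fprintf", "fwrite", "fread", "write", "read",
   "fopen", "fclose", "puts", "fputs",
   "ESP_LOGI", "ESP_LOGE", "ESP_LOGW", "ESP_LOGD", "ESP_LOGV",
   "esp_log_write", "uart_write_bytes", "uart_read_bytes"]

def HW_SIGNALS_EXACT : List String :=
  ["gpio_set_level", "gpio_get_level", "gpio_config",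
   "gpio_set_direction", "gpio_set_pull_mode",
   "uart_param_config", "uart_driver_install", "uart_driver_delete",
   "spi_bus_initialize", "spi_bus_free", "spi_device_transmit",
   "i2c_master_cmd_begin", "i2c_master_start", "i2c_master_stop",
   "REG_WRITE", "REG_READ", "WRITE_PERI_REG", "READ_PERI_REG",
   "SET_PERI_REG_MASK", "CLEAR_PERI_REG_MASK",
   "esp_rom_gpio_pad_select_gpio",
   "ledc_set_duty", "ledc_update_duty",
   "adc1_get_raw", "adc2_get_raw",
   "rmt_write_items", "rmt_rx_start", "rmt_tx_start",
   "timer_set_counter_value", "timer_start", "timer_pause",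
   "esp_intr_alloc", "esp_intr_free", "esp_intr_enable", "esp_intr_disable"]

def HW_PREFIXES : List String :=
  ["HAL_", "gpio_", "uart_", "spi_", "i2c_", "ledc_", "adc_",
   "rmt_", "timer_", "esp_rom_gpio"]

-- ===== PORT A =====
-- body of A's `for name in call_names` loop; the inner `for prefix in HW_PREFIXES: … break`
-- only ever adds "hardware" once, so its effect is exactly "some prefix matches" (order-independent)
def pvAStep (st : PySem.Set String) (name : String) : PySem.Set String :=
  let st := if MEMORY_SIGNALS.contains name then PySem.Set.add st "memory" else st
  let st := if IO_SIGNALS.contains name then PySem.Set.add st "io" else st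
  let st := if HW_SIGNALS_EXACT.contains name then PySem.Set.add st "hardware" else st
  if HW_PREFIXES.any (fun p => PySem.Str.startswith name p) then PySem.Set.add st "hardware" else st

def deterministic_side_effects (call_names : List String) : List String × Bool :=
  let matched := call_names.foldl pvAStep PySem.Set.empty
  (PySem.List.sorted matched (fun x => x) false,
   decide (matched.length = 0) && decide (0 < call_names.length))

-- ===== PORT B =====
def deterministic_side_effects_alt (call_names : List String) : List String × Bool :=
  let hw := call_names.any (fun n => HW_SIGNALS_EXACT.contains n
              || HW_PREFIXES.any (fun p => PySem.Str.startswith n p))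
  let io := call_names.any (fun n => IO_SIGNALS.contains n)
  let mem := call_names.any (fun n => MEMORY_SIGNALS.contains n)
  let labels := (if hw then ["hardware"] else []) ++ (if io then ["io"] else [])
                  ++ (if mem then ["memory"] else [])
  (labels, labels.isEmpty && !call_names.isEmpty)

-- ===== PRECONDITION & SPEC =====
def Spec_deterministic_side_effects (call_names : List String) (out : List String × Bool) : Prop := out = deterministic_side_effects_alt call_names
instance (call_names : List String) (out : List String × Bool) : Decidable (Spec_deterministic_side_effects call_names out) := by unfold Spec_deterministic_side_effects; infer_instance

-- ===== CLAIM (what is proved, stated in full; the proofs are below) =====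
def Claim_equal_deterministic_side_effects : Prop := ∀ (call_names : List String), Dom_deterministic_side_effects call_names → Spec_deterministic_side_effects call_names (deterministic_side_effects call_names)

-- ===== LEMMAS AND PROOFS =====

def pvHwHit (n : String) : Bool :=
  HW_SIGNALS_EXACT.contains n || HW_PREFIXES.any (fun p => PySem.Str.startswith n p)

lemma mem_pvAStep (st : PySem.Set String) (n x : String) :
    x ∈ pvAStep st n ↔ x ∈ st ∨ (x = "memory" ∧ MEMORY_SIGNALS.contains n)
      ∨ (x = "io" ∧ IO_SIGNALS.contains n) ∨ (x = "hardware" ∧ pvHwHit n) := by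
  unfold pvAStep pvHwHit
  generalize MEMORY_SIGNALS.contains n = bm
  generalize IO_SIGNALS.contains n = bi
  generalize HW_SIGNALS_EXACT.contains n = be
  generalize (HW_PREFIXES.any fun p => PySem.Str.startswith n p) = bp
  cases bm <;> cases bi <;> cases be <;> cases bp <;>
    simp [PySem.Set.mem_add] <;> tauto

lemma nodup_pvAStep (st : PySem.Set String) (n : String) (h : st.Nodup) :
    (pvAStep st n).Nodup := by
  unfold pvAStep
  split_ifs <;> (repeat' apply PySem.Set.nodup_add) <;> exact h

lemma mem_foldl_pvAStep (l : List String) (st : PySem.Set String) (x : String) :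
    x ∈ l.foldl pvAStep st ↔ x ∈ st ∨ (x = "memory" ∧ l.any (fun n => MEMORY_SIGNALS.contains n))
      ∨ (x = "io" ∧ l.any (fun n => IO_SIGNALS.contains n))
      ∨ (x = "hardware" ∧ l.any pvHwHit) := by
  induction l generalizing st with
  | nil => simp
  | cons n t ih =>
      simp only [List.foldl_cons, List.any_cons, ih, mem_pvAStep]
      simp only [Bool.or_eq_true]
      tauto

lemma nodup_foldl_pvAStep (l : List String) (st : PySem.Set String) (h : st.Nodup) :
    (l.foldl pvAStep st).Nodup := by
  induction l generalizing st with
  | nil => exact h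
  | cons n t ih => exact ih _ (nodup_pvAStep _ _ h)

-- the canonical label list for given flags (the shape of B's labels expression)
def pvCanon (hw io mem : Bool) : List String :=
  (if hw then ["hardware"] else []) ++ (if io then ["io"] else []) ++ (if mem then ["memory"] else [])

lemma mem_pvCanon (hw io mem : Bool) (x : String) :
    x ∈ pvCanon hw io mem ↔ (x = "memory" ∧ mem) ∨ (x = "io" ∧ io) ∨ (x = "hardware" ∧ hw) := by
  unfold pvCanon
  cases hw <;> cases io <;> cases mem <;> simp <;> tauto

lemma nodup_pvCanon (hw io mem : Bool) : (pvCanon hw io mem).Nodup := by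
  cases hw <;> cases io <;> cases mem <;> decide

lemma pairwise_lt_pvCanon (hw io mem : Bool) :
    (pvCanon hw io mem).Pairwise (fun a b : String => (fun x => x) a < (fun x => x) b) := by
  cases hw <;> cases io <;> cases mem <;>
    simp [pvCanon, String.lt_iff_toList_lt] <;> decide

lemma pv_snd (c : List String) (d : List String) (xs : List String) (h : c.length = d.length) :
    (decide (c.length = 0) && decide (0 < xs.length)) = (d.isEmpty && !xs.isEmpty) := by
  rw [h]
  cases d <;> cases xs <;> simp

theorem pv_main (call_names : List String) :
    deterministic_side_effects call_names = deterministic_side_effects_alt call_names := by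
  have hperm : (pvCanon (call_names.any pvHwHit)
        (call_names.any (fun n => IO_SIGNALS.contains n))
        (call_names.any (fun n => MEMORY_SIGNALS.contains n))).Perm
      (call_names.foldl pvAStep PySem.Set.empty) := by
    rw [List.perm_ext_iff_of_nodup (nodup_pvCanon _ _ _)
      (nodup_foldl_pvAStep _ _ (by simp [PySem.Set.empty]))]
    intro x
    rw [mem_pvCanon, mem_foldl_pvAStep]
    simp [PySem.Set.empty]
  simp only [deterministic_side_effects, deterministic_side_effects_alt]
  refine Prod.ext ?_ ?_
  · exact PySem.List.sorted_eq_of_perm_of_pairwise_lt _ _ (fun x => x) hperm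
      (pairwise_lt_pvCanon _ _ _)
  · exact pv_snd _ _ _ hperm.length_eq.symm

-- ===== VERDICT (by name: the statement is the Claim_ definition above) =====
theorem deterministic_side_effects_spec : Claim_equal_deterministic_side_effects := by
  intro call_names _
  unfold Spec_deterministic_side_effects
  exact pv_main call_names
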